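-- pv_equiv track=rewrite | github.com/vigneswar1/CS303 | lab9/FOL.py | make_substitutions
-- ===== SOURCE A (Python) =====
-- def clause_parsing(premise):
--     if "(" not in premise:
--         return premise, []
--     indx = premise.index("(")
--     function = premise[:indx]
--     values = premise[indx+1:-1]
--
--     balance = 0
--     curr = ""
--     vals = []
--     for ptr in values:
--         if ptr == ',' and balance == 0:
--             vals.append(curr)
--             curr = ""
--         else:
--             if ptr == "(":
--                 balance += 1
--             elif ptr == ")":
--                 balance -= 1
--             curr += ptr
--     if curr:
--         vals.append(curr)
--     return function, vals
--
-- def make_substitutions(expr, values):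
--     if "(" not in expr:
--         if expr in values:
--             result = values[expr]
--             while result in values and result != values[result]:
--                 result = values[result]
--             return result
--         return expr
--
--     func, vals = clause_parsing(expr)
--     new_values = [make_substitutions(val, values) for val in vals]
--     return func + "(" + ",".join(new_values) + ")"
-- ===== SOURCE B (Python) =====
-- def make_substitutions(expr, values):
--     # Resolve every substitution chain once (memoised, with path compression),
--     # then substitute atoms by a single lookup.
--     resolved = {}
--     for k in values:
--         if k in resolved:
--             continue
--         path = []
--         cur = k
--         while cur in values and cur not in resolved and values[cur] != cur and cur not in path:
--             path.append(cur)
--             cur = values[cur]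
--         final = resolved.get(cur, cur)
--         resolved[k] = final
--         for node in path:
--             resolved[node] = final
--     return _subst(expr, resolved)
--
-- def _split_args(s):
--     # split on top-level commas, recording slice start indices (single pass)
--     parts = []
--     start = 0
--     depth = 0
--     for i, ch in enumerate(s):
--         if ch == ',' and depth == 0:
--             parts.append(s[start:i])
--             start = i + 1
--         elif ch == '(':
--             depth += 1
--         elif ch == ')':
--             depth -= 1
--     if start < len(s):
--         parts.append(s[start:])
--     return parts
--
-- def _subst(e, resolved):
--     if '(' not in e:
--         return resolved.get(e, e)
--     i = e.index('(')
--     args = _split_args(e[i + 1:-1])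
--     return e[:i] + '(' + ','.join(_subst(a, resolved) for a in args) + ')'
-- ===== Notes on version B (the rewrite author's own statement) =====
-- stated objective: alternative
-- what changed: A re-walks the substitution chain in the dict for every atom occurrence; B instead resolves each dictionary key's chain once up front into a memoised, path-compressed map (one lookup per atom), and splits arguments by recording slice start indices instead of rebuilding each argument character by character.
import Mathlib
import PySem

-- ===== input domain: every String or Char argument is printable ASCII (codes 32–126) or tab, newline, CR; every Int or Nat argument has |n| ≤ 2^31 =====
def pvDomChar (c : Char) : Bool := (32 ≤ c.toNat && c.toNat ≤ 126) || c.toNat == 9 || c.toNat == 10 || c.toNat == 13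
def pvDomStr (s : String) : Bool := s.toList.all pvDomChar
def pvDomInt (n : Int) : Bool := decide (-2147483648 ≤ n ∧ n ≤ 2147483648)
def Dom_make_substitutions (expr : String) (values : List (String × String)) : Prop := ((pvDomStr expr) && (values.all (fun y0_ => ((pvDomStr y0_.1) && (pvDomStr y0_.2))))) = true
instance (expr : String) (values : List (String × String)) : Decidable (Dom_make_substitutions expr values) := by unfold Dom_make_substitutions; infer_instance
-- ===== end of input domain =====

-- B replaces A's per-occurrence substitution-chain walking by a substitution map
-- resolved once up front (memoised, path-compressed), and splits arguments by
-- slice indices instead of character accumulation; return values agree on Pre_.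

-- ===== PORT A =====
-- the while-loop of A's atom case: result = values[expr]; while result in values and result != values[result]: ...
def aChain (values : List (String × String)) : Nat → String → String
  | 0, r => r
  | fuel+1, r =>
    match (PySem.Dict.mk values).get? r with
    | none => r
    | some v => if v = r then r else aChain values fuel v

-- the for-loop of clause_parsing: state (balance, curr, vals)
def aSplitFold : List Char → Int → List Char → List (List Char) → List (List Char)
  | [], _, curr, vals => if curr ≠ [] then vals ++ [curr] else vals
  | c :: rest, b, curr, vals =>
    if c = ',' ∧ b = 0 then aSplitFold rest b [] (vals ++ [curr])
    else aSplitFold rest (if c = '(' then b + 1 else if c = ')' then b - 1 else b) (curr ++ [c]) vals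

def clauseParse (cs : List Char) : List Char × List (List Char) :=
  if '(' ∉ cs then (cs, [])
  else
    let indx := (PySem.List.index? cs '(').getD 0
    (PySem.List.slice cs none (some (indx : Int)),
     aSplitFold (PySem.List.slice cs (some ((indx : Int) + 1)) (some (-1))) 0 [] [])

def aWorker (values : List (String × String)) : Nat → List Char → List Char
  | 0, cs => cs
  | fuel+1, cs =>
    if '(' ∉ cs then
      match (PySem.Dict.mk values).get? (String.ofList cs) with
      | none => cs
      | some v => (aChain values (values.length + 1) v).toList
    else
      let fv := clauseParse cs
      fv.1 ++ '(' :: (List.intercalate [','] (fv.2.map (fun v => aWorker values fuel v)) ++ [')'])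

def make_substitutions (expr : String) (values : List (String × String)) : String :=
  String.ofList (aWorker values (expr.toList.length + 1) expr.toList)

-- ===== PORT B =====
-- the while-loop building one resolution path (guard 'cur not in path' bounds it by the number of keys)
def bWalk (vd d : PySem.Dict String String) : Nat → String → List String → List String × String
  | 0, cur, path => (path, d.getD cur cur)
  | fuel+1, cur, path =>
    match vd.get? cur with
    | some nxt =>
      if (d.get? cur).isNone ∧ nxt ≠ cur ∧ cur ∉ path then
        bWalk vd d fuel nxt (path ++ [cur])
      else (path, d.getD cur cur)
    | none => (path, d.getD cur cur)

def bBuild (values : List (String × String)) : PySem.Dict String String :=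
  values.foldl (fun d kv =>
    if (d.get? kv.1).isSome then d
    else
      let w := bWalk (PySem.Dict.mk values) d (values.length + 1) kv.1 []
      w.1.foldl (fun r node => r.insert node w.2) (d.insert kv.1 w.2))
    PySem.Dict.empty

-- _split_args: single pass over enumerate(s), recording slice start indices
def bSplitLoop (s : List Char) : List (Int × Char) → List (List Char) → Int → Int → List (List Char) × Int
  | [], parts, start, _ => (parts, start)
  | (i, ch) :: rest, parts, start, depth =>
    if ch = ',' ∧ depth = 0 then
      bSplitLoop s rest (parts ++ [PySem.List.slice s (some start) (some i)]) (i + 1) depth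
    else
      bSplitLoop s rest parts start (if ch = '(' then depth + 1 else if ch = ')' then depth - 1 else depth)

def bSplit (s : List Char) : List (List Char) :=
  let r := bSplitLoop s (PySem.List.enumerate s 0) [] 0 0
  if r.2 < (s.length : Int) then r.1 ++ [PySem.List.slice s (some r.2) none] else r.1

def bWorker (resolved : PySem.Dict String String) : Nat → List Char → List Char
  | 0, cs => cs
  | fuel+1, cs =>
    if '(' ∉ cs then (resolved.getD (String.ofList cs) (String.ofList cs)).toList
    else
      let i := (PySem.List.index? cs '(').getD 0
      PySem.List.slice cs none (some (i : Int)) ++ '(' ::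
        (List.intercalate [',']
          ((bSplit (PySem.List.slice cs (some ((i : Int) + 1)) (some (-1)))).map
            (fun a => bWorker resolved fuel a)) ++ [')'])

def make_substitutions_alt (expr : String) (values : List (String × String)) : String :=
  String.ofList (bWorker (bBuild values) (expr.toList.length + 1) expr.toList)

-- ===== PRECONDITION & SPEC =====
-- Pre_ excludes substitution dicts containing a chain cycle between distinct keys:
-- on those A's while-loop never terminates (no value is returned).
def Pre_make_substitutions (expr : String) (values : List (String × String)) : Prop :=
  ∀ k ∈ values.map Prod.fst, ∀ m ∈ List.range values.length,
    ¬ ((fun s => (((PySem.Dict.mk values).get? s).getD s))^[m+1] k = k ∧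
       ((PySem.Dict.mk values).get? k).getD k ≠ k)
instance (expr : String) (values : List (String × String)) : Decidable (Pre_make_substitutions expr values) := by
  unfold Pre_make_substitutions; infer_instance

def pvWitness_make_substitutions : String × (List (String × String)) :=
  ("P(x,Q(y,z))", [("x", "y"), ("y", "b"), ("z", "z")])

def Spec_make_substitutions (expr : String) (values : List (String × String)) (out : String) : Prop := out = make_substitutions_alt expr values
instance (expr : String) (values : List (String × String)) (out : String) : Decidable (Spec_make_substitutions expr values out) := by unfold Spec_make_substitutions; infer_instance

-- ===== CLAIM (what is proved, stated in full; the proofs are below) =====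
def Claim_equal_make_substitutions : Prop := ∀ (expr : String) (values : List (String × String)), Dom_make_substitutions expr values → Pre_make_substitutions expr values → Spec_make_substitutions expr values (make_substitutions expr values)

-- ===== LEMMAS AND PROOFS =====


-- abbreviations for the proofs: one substitution step, "non-terminal", A's chain value
def pvF (values : List (String × String)) (s : String) : String :=
  ((PySem.Dict.mk values).get? s).getD s

def pvNT (values : List (String × String)) (s : String) : Prop :=
  ∃ v, (PySem.Dict.mk values).get? s = some v ∧ v ≠ s

def pvR (values : List (String × String)) (r : String) : String :=
  aChain values (values.length + 1) r

def pvKeys (values : List (String × String)) : List String := values.map Prod.fst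

def pvGood (values : List (String × String)) (d : PySem.Dict String String) : Prop :=
  ∀ x v, d.get? x = some v → x ∈ pvKeys values ∧ v = pvR values x

lemma mem_keys_of_get?_eq_some {values : List (String × String)} {s v : String}
    (h : (PySem.Dict.mk values).get? s = some v) : s ∈ pvKeys values := by
  have h1 := PySem.Dict.mem_items_of_get?_eq_some _ h
  have h2 := PySem.Dict.mem_keys_of_mem_items _ h1
  simpa [PySem.Dict.keys, pvKeys] using h2

lemma pre_spec {expr : String} {values : List (String × String)}
    (hpre : Pre_make_substitutions expr values) {k : String} (hk : k ∈ pvKeys values)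
    {t : Nat} (h1 : 1 ≤ t) (h2 : t ≤ values.length)
    (hcyc : (pvF values)^[t] k = k) (hne : pvF values k ≠ k) : False := by
  have hm : t - 1 ∈ List.range values.length := by
    simp only [List.mem_range]; omega
  have := hpre k (by simpa [pvKeys] using hk) (t - 1) hm
  apply this
  constructor
  · have : t - 1 + 1 = t := by omega
    rw [this]; exact hcyc
  · exact hne

lemma walk_terminates {expr : String} {values : List (String × String)}
    (hpre : Pre_make_substitutions expr values) (r : String) :
    ∃ m, m ≤ values.length ∧ ¬ pvNT values ((pvF values)^[m] r) := by
  by_contra h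
  have hnt : ∀ m : Nat, m ≤ values.length → pvNT values ((pvF values)^[m] r) := by
    intro m hm
    by_contra hq
    exact h ⟨m, hm, hq⟩
  have hkeys : ∀ m : Nat, m ≤ values.length → (pvF values)^[m] r ∈ pvKeys values := by
    intro m hm
    obtain ⟨v, hv, -⟩ := hnt m hm
    exact mem_keys_of_get?_eq_some hv
  have hcard : ((pvKeys values).toFinset.card) < (Finset.univ : Finset (Fin (values.length + 1))).card := by
    have h1 : (pvKeys values).toFinset.card ≤ (pvKeys values).length := List.toFinset_card_le _
    have h2 : (pvKeys values).length = values.length := by simp [pvKeys]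
    simp only [Finset.card_univ, Fintype.card_fin]
    omega
  obtain ⟨i, -, j, -, hij, heq⟩ :=
    Finset.exists_ne_map_eq_of_card_lt_of_maps_to hcard
      (f := fun i : Fin (values.length + 1) => (pvF values)^[i.val] r)
      (fun i _ => by
        simp only [List.mem_toFinset, Finset.mem_coe]
        exact hkeys i.val (by omega))
  rcases lt_or_gt_of_ne (fun hv : i.val = j.val => hij (Fin.ext hv)) with hlt | hlt
  case _ =>
    have hcyc : (pvF values)^[j.val - i.val] ((pvF values)^[i.val] r) = (pvF values)^[i.val] r := by
      rw [← Function.iterate_add_apply]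
      have : j.val - i.val + i.val = j.val := by omega
      rw [this, heq]
    obtain ⟨v, hv, hvne⟩ := hnt i.val (by omega)
    refine pre_spec hpre (hkeys i.val (by omega)) (t := j.val - i.val) (by omega) (by omega) hcyc ?_
    simpa [pvF, hv] using hvne
  case _ =>
    have hcyc : (pvF values)^[i.val - j.val] ((pvF values)^[j.val] r) = (pvF values)^[j.val] r := by
      rw [← Function.iterate_add_apply]
      have : i.val - j.val + j.val = i.val := by omega
      rw [this, heq]
    obtain ⟨v, hv, hvne⟩ := hnt j.val (by omega)
    refine pre_spec hpre (hkeys j.val (by omega)) (t := i.val - j.val) (by omega) (by omega) hcyc ?_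
    simpa [pvF, hv] using hvne

lemma aChain_term_eq {values : List (String × String)} {r : String}
    (h : ¬ pvNT values r) : ∀ fuel, aChain values fuel r = r := by
  intro fuel
  cases fuel with
  | zero => rfl
  | succ fuel =>
    unfold aChain
    cases hv : (PySem.Dict.mk values).get? r with
    | none => rfl
    | some v =>
      have hvr : v = r := by
        by_contra hne
        exact h ⟨v, hv, hne⟩
      simp [hvr]

lemma chain_stable {values : List (String × String)} :
    ∀ (m f1 f2 : Nat) (r : String), m ≤ f1 → m ≤ f2 → ¬ pvNT values ((pvF values)^[m] r) →
    aChain values f1 r = aChain values f2 r := by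
  intro m
  induction m with
  | zero =>
    intro f1 f2 r _ _ hterm
    simp only [Function.iterate_zero, id_eq] at hterm
    rw [aChain_term_eq hterm, aChain_term_eq hterm]
  | succ m ih =>
    intro f1 f2 r h1 h2 hterm
    by_cases hnt : pvNT values r
    · obtain ⟨v, hv, hvne⟩ := hnt
      obtain ⟨f1', rfl⟩ : ∃ f1', f1 = f1' + 1 := ⟨f1 - 1, by omega⟩
      obtain ⟨f2', rfl⟩ : ∃ f2', f2 = f2' + 1 := ⟨f2 - 1, by omega⟩
      have hstep : ∀ f', aChain values (f' + 1) r = aChain values f' v := by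
        intro f'
        conv_lhs => rw [aChain]
        simp [hv, hvne]
      rw [hstep, hstep]
      have hfr : pvF values r = v := by simp [pvF, hv]
      have hterm' : ¬ pvNT values ((pvF values)^[m] v) := by
        rw [← hfr, ← Function.iterate_succ_apply]
        exact hterm
      exact ih f1' f2' v (by omega) (by omega) hterm'
    · rw [aChain_term_eq hnt, aChain_term_eq hnt]

lemma chain_term {values : List (String × String)} {r : String}
    (h : ¬ pvNT values r) : pvR values r = r := by
  exact aChain_term_eq h _

lemma chain_step {expr : String} {values : List (String × String)}
    (hpre : Pre_make_substitutions expr values) {r : String} (h : pvNT values r) :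
    pvR values r = pvR values (pvF values r) := by
  obtain ⟨v, hv, hvne⟩ := h
  obtain ⟨m, hm, hterm⟩ := walk_terminates hpre r
  have hm0 : m ≠ 0 := by
    intro h0
    rw [h0] at hterm
    exact hterm ⟨v, hv, hvne⟩
  obtain ⟨m', rfl⟩ : ∃ m', m = m' + 1 := ⟨m - 1, by omega⟩
  have hfr : pvF values r = v := by simp [pvF, hv]
  have hterm' : ¬ pvNT values ((pvF values)^[m'] (pvF values r)) := by
    rw [← Function.iterate_succ_apply]
    exact hterm
  have hstep : pvR values r = aChain values values.length (pvF values r) := by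
    show aChain values (values.length + 1) r = _
    conv_lhs => rw [aChain]
    simp [hv, hvne, hfr]
  rw [hstep]
  exact chain_stable m' values.length (values.length + 1) (pvF values r) (by omega) (by omega) hterm' 

lemma R_iter {expr : String} {values : List (String × String)}
    (hpre : Pre_make_substitutions expr values) {k : String} :
    ∀ (j : Nat), (∀ i < j, pvNT values ((pvF values)^[i] k)) → pvR values ((pvF values)^[j] k) = pvR values k := by
  intro j
  induction j with
  | zero => intro _; rfl
  | succ j ih =>
    intro hnt
    rw [Function.iterate_succ_apply']
    rw [← chain_step hpre (hnt j (by omega))]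
    exact ih (fun i hi => hnt i (by omega))

lemma path_len_le {values : List (String × String)} {k : String} {j : Nat}
    (hnt : ∀ i < j, pvNT values ((pvF values)^[i] k))
    (hnd : ((List.range j).map (fun i => (pvF values)^[i] k)).Nodup) : j ≤ values.length := by
  have hsub : ((List.range j).map (fun i => (pvF values)^[i] k)) ⊆ pvKeys values := by
    intro x hx
    obtain ⟨i, hi, rfl⟩ := List.mem_map.mp hx
    rw [List.mem_range] at hi
    obtain ⟨v, hv, -⟩ := hnt i hi
    exact mem_keys_of_get?_eq_some hv
  have h1 := (hnd.subperm hsub).length_le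
  simp only [List.length_map, List.length_range] at h1
  simpa [pvKeys] using h1

lemma walk_main {expr : String} {values : List (String × String)}
    (hpre : Pre_make_substitutions expr values) {d : PySem.Dict String String}
    (hgood : pvGood values d) :
    ∀ (fuel j : Nat) (k : String),
      (∀ i < j, pvNT values ((pvF values)^[i] k)) →
      ((List.range j).map (fun i => (pvF values)^[i] k)).Nodup →
      values.length + 1 ≤ fuel + j →
      (bWalk (PySem.Dict.mk values) d fuel ((pvF values)^[j] k)
          ((List.range j).map (fun i => (pvF values)^[i] k))).2 = pvR values k ∧
      ∀ p ∈ (bWalk (PySem.Dict.mk values) d fuel ((pvF values)^[j] k)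
          ((List.range j).map (fun i => (pvF values)^[i] k))).1,
        p ∈ pvKeys values ∧ pvR values p = pvR values k := by
  intro fuel
  induction fuel with
  | zero =>
    intro j k hnt hnd hfuel
    exact absurd (path_len_le hnt hnd) (by omega)
  | succ fuel ih =>
    intro j k hnt hnd hfuel
    have hpaths : ∀ p ∈ (List.range j).map (fun i => (pvF values)^[i] k),
        p ∈ pvKeys values ∧ pvR values p = pvR values k := by
      intro p hp
      obtain ⟨i, hi, rfl⟩ := List.mem_map.mp hp
      rw [List.mem_range] at hi
      obtain ⟨v, hv, -⟩ := hnt i hi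
      exact ⟨mem_keys_of_get?_eq_some hv, R_iter hpre i (fun i' hi' => hnt i' (by omega))⟩
    rw [bWalk]
    cases hv : (PySem.Dict.mk values).get? ((pvF values)^[j] k) with
    | none =>
      refine ⟨?_, hpaths⟩
      cases hd : d.get? ((pvF values)^[j] k) with
      | some w =>
        rw [PySem.Dict.getD_eq_get?_getD, hd, Option.getD_some]
        rw [(hgood _ _ hd).2]
        exact R_iter hpre j hnt
      | none =>
        rw [PySem.Dict.getD_eq_get?_getD, hd, Option.getD_none]
        have hterm : ¬ pvNT values ((pvF values)^[j] k) := by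
          rintro ⟨v, hv2, -⟩
          rw [hv] at hv2
          simp at hv2
        rw [← R_iter hpre j hnt, chain_term hterm]
    | some nxt =>
      by_cases hg : (d.get? ((pvF values)^[j] k)).isNone ∧ nxt ≠ (pvF values)^[j] k ∧
          (pvF values)^[j] k ∉ (List.range j).map (fun i => (pvF values)^[i] k)
      · simp only [if_pos hg]
        have hnxt : nxt = (pvF values)^[j+1] k := by
          rw [Function.iterate_succ_apply']
          simp [pvF, hv]
        have hpath : ((List.range j).map (fun i => (pvF values)^[i] k)) ++ [(pvF values)^[j] k]
            = (List.range (j+1)).map (fun i => (pvF values)^[i] k) := by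
          rw [List.range_succ, List.map_append]
          simp
        rw [hnxt, hpath]
        have hnt' : ∀ i < j + 1, pvNT values ((pvF values)^[i] k) := by
          intro i hi
          by_cases hij : i = j
          · subst hij; exact ⟨nxt, hv, hg.2.1⟩
          · exact hnt i (by omega)
        have hnd' : ((List.range (j+1)).map (fun i => (pvF values)^[i] k)).Nodup := by
          rw [← hpath]
          rw [List.nodup_append]
          refine ⟨hnd, List.nodup_singleton _, fun a ha b hb => ?_⟩
          rw [List.mem_singleton] at hb
          subst hb
          rintro rfl
          exact hg.2.2 ha
        exact ih (j+1) k hnt' hnd' (by omega)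
      · simp only [if_neg hg]
        refine ⟨?_, hpaths⟩
        cases hd : d.get? ((pvF values)^[j] k) with
        | some w =>
          rw [PySem.Dict.getD_eq_get?_getD, hd, Option.getD_some]
          rw [(hgood _ _ hd).2]
          exact R_iter hpre j hnt
        | none =>
          by_cases hnc : nxt = (pvF values)^[j] k
          · rw [PySem.Dict.getD_eq_get?_getD, hd, Option.getD_none]
            have hterm : ¬ pvNT values ((pvF values)^[j] k) := by
              rintro ⟨v, hv2, hvne⟩
              rw [hv] at hv2
              cases hv2
              exact hvne hnc
            rw [← R_iter hpre j hnt, chain_term hterm]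
          · exfalso
            have hcp : (pvF values)^[j] k ∈ (List.range j).map (fun i => (pvF values)^[i] k) := by
              by_contra hcp
              exact hg ⟨by simp [hd], hnc, hcp⟩
            obtain ⟨i, hi, heq⟩ := List.mem_map.mp hcp
            rw [List.mem_range] at hi
            have hjn : j ≤ values.length := path_len_le hnt hnd
            have heq' : (pvF values)^[i] k = (pvF values)^[j] k := heq
            have hcyc : (pvF values)^[j - i] ((pvF values)^[j] k) = (pvF values)^[j] k := by
              calc (pvF values)^[j - i] ((pvF values)^[j] k)
                  = (pvF values)^[j - i] ((pvF values)^[i] k) := by rw [heq']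
                _ = (pvF values)^[j - i + i] k := (Function.iterate_add_apply _ _ _ _).symm
                _ = (pvF values)^[j] k := by rw [show j - i + i = j from by omega]
            have hmem : (pvF values)^[j] k ∈ pvKeys values := mem_keys_of_get?_eq_some hv
            refine pre_spec hpre hmem (t := j - i) (by omega) (by omega) hcyc ?_
            simp [pvF, hv]
            exact hnc

lemma good_insert {values : List (String × String)} {d : PySem.Dict String String}
    (hgood : pvGood values d) {x w : String} (hx : x ∈ pvKeys values)
    (hw : w = pvR values x) : pvGood values (d.insert x w) := by
  intro x' v' h
  rw [PySem.Dict.get?_insert] at h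
  split_ifs at h with hxx
  · cases h
    subst hxx
    exact ⟨hx, hw⟩
  · exact hgood x' v' h

lemma get?_isSome_foldl_insert {w : String} :
    ∀ (l : List String) (d : PySem.Dict String String) (x : String), (d.get? x).isSome →
      ((l.foldl (fun r node => r.insert node w) d).get? x).isSome := by
  intro l
  induction l with
  | nil => intro d x h; exact h
  | cons a l ih =>
    intro d x h
    rw [List.foldl_cons]
    apply ih
    rw [PySem.Dict.get?_insert]
    split_ifs
    · simp
    · exact h

lemma good_foldl_insert {values : List (String × String)} {w : String} :
    ∀ (l : List String) (d : PySem.Dict String String), pvGood values d →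
      (∀ p ∈ l, p ∈ pvKeys values ∧ pvR values p = w) →
      pvGood values (l.foldl (fun r node => r.insert node w) d) := by
  intro l
  induction l with
  | nil => intro d hgood _; exact hgood
  | cons a l ih =>
    intro d hgood hmem
    rw [List.foldl_cons]
    exact ih _ (good_insert hgood (hmem a (by simp)).1 (hmem a (by simp)).2.symm)
      (fun p hp => hmem p (by simp [hp]))

lemma build_mono {values : List (String × String)} :
    ∀ (l : List (String × String)) (d : PySem.Dict String String) (x : String),
      ((d.get? x).isSome) →
      (((l.foldl (fun d kv =>
        if (d.get? kv.1).isSome then d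
        else
          let w := bWalk (PySem.Dict.mk values) d (values.length + 1) kv.1 []
          w.1.foldl (fun r node => r.insert node w.2) (d.insert kv.1 w.2)) d).get? x).isSome) := by
  intro l
  induction l with
  | nil => intro d x h; exact h
  | cons kv l ih =>
    intro d x h
    rw [List.foldl_cons]
    apply ih
    by_cases hs : (d.get? kv.1).isSome
    · simp only [if_pos hs]; exact h
    · simp only [if_neg hs]
      apply get?_isSome_foldl_insert
      rw [PySem.Dict.get?_insert]
      split_ifs
      · simp
      · exact h

lemma build_invariant {expr : String} {values : List (String × String)}
    (hpre : Pre_make_substitutions expr values) :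
    ∀ (l : List (String × String)) (d : PySem.Dict String String),
      (∀ kv ∈ l, kv ∈ values) → pvGood values d →
      pvGood values (l.foldl (fun d kv =>
        if (d.get? kv.1).isSome then d
        else
          let w := bWalk (PySem.Dict.mk values) d (values.length + 1) kv.1 []
          w.1.foldl (fun r node => r.insert node w.2) (d.insert kv.1 w.2)) d) ∧
      ∀ kv ∈ l, (((l.foldl (fun d kv =>
        if (d.get? kv.1).isSome then d
        else
          let w := bWalk (PySem.Dict.mk values) d (values.length + 1) kv.1 []
          w.1.foldl (fun r node => r.insert node w.2) (d.insert kv.1 w.2)) d).get? kv.1).isSome) := by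
  intro l
  induction l with
  | nil => intro d _ hgood; exact ⟨hgood, by simp⟩
  | cons kv l ih =>
    intro d hsub hgood
    have hkv : kv ∈ values := hsub kv (by simp)
    have hk1 : kv.1 ∈ pvKeys values := List.mem_map.mpr ⟨kv, hkv, rfl⟩
    by_cases hs : (d.get? kv.1).isSome
    · rw [List.foldl_cons]
      simp only [if_pos hs]
      obtain ⟨hg', hc'⟩ := ih d (fun kv' h => hsub kv' (by simp [h])) hgood
      refine ⟨hg', ?_⟩
      intro kv' hkv'
      rcases List.mem_cons.mp hkv' with rfl | hmem
      · exact build_mono l d kv'.1 hs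
      · exact hc' kv' hmem
    · rw [List.foldl_cons]
      simp only [if_neg hs]
      have hwalk := walk_main hpre hgood (values.length + 1) 0 kv.1 (by omega)
        (by simp) (by omega)
      simp only [Function.iterate_zero, id_eq, List.range_zero, List.map_nil] at hwalk
      obtain ⟨hfin, hpaths⟩ := hwalk
      set w := bWalk (PySem.Dict.mk values) d (values.length + 1) kv.1 [] with hw
      have hd' : pvGood values (w.1.foldl (fun r node => r.insert node w.2) (d.insert kv.1 w.2)) := by
        apply good_foldl_insert
        · exact good_insert hgood hk1 hfin
        · intro p hp
          exact ⟨(hpaths p hp).1, by rw [(hpaths p hp).2, ← hfin]⟩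
      obtain ⟨hg', hc'⟩ := ih _ (fun kv' h => hsub kv' (by simp [h])) hd'
      refine ⟨hg', ?_⟩
      intro kv' hkv'
      rcases List.mem_cons.mp hkv' with rfl | hmem
      · apply build_mono
        apply get?_isSome_foldl_insert
        rw [PySem.Dict.get?_insert]
        simp
      · exact hc' kv' hmem

lemma resolved_eq {expr : String} {values : List (String × String)}
    (hpre : Pre_make_substitutions expr values) (e : String) :
    (bBuild values).getD e e = pvR values e := by
  have hempty : pvGood values PySem.Dict.empty := by
    intro x v h
    rw [PySem.Dict.get?_empty] at h
    simp at h
  obtain ⟨hgood, hcompl⟩ := build_invariant hpre values PySem.Dict.empty (fun kv h => h) hempty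
  unfold bBuild
  cases h : (values.foldl (fun d kv =>
      if (d.get? kv.1).isSome then d
      else
        let w := bWalk (PySem.Dict.mk values) d (values.length + 1) kv.1 []
        w.1.foldl (fun r node => r.insert node w.2) (d.insert kv.1 w.2)) PySem.Dict.empty).get? e with
  | some w =>
    rw [PySem.Dict.getD_eq_get?_getD, h, Option.getD_some]
    exact (hgood _ _ h).2
  | none =>
    rw [PySem.Dict.getD_eq_get?_getD, h, Option.getD_none]
    have hterm : ¬ pvNT values e := by
      rintro ⟨v, hv, -⟩
      have he : e ∈ pvKeys values := mem_keys_of_get?_eq_some hv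
      obtain ⟨kv, hkv, rfl⟩ := List.mem_map.mp he
      have := hcompl kv hkv
      rw [h] at this
      simp at this
    exact (chain_term hterm).symm

lemma split_loop_rel {s : List Char} :
    ∀ (t : List Char) (p start : Nat) (b : Int) (curr : List Char) (vals : List (List Char)),
      start ≤ p → p ≤ s.length → t = s.drop p → curr = (s.drop start).take (p - start) →
      aSplitFold t b curr vals =
        (if (bSplitLoop s (PySem.List.enumerate t (p : Int)) vals (start : Int) b).2 < (s.length : Int)
         then (bSplitLoop s (PySem.List.enumerate t (p : Int)) vals (start : Int) b).1
            ++ [PySem.List.slice s (some (bSplitLoop s (PySem.List.enumerate t (p : Int)) vals (start : Int) b).2) none]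
         else (bSplitLoop s (PySem.List.enumerate t (p : Int)) vals (start : Int) b).1) := by
  intro t
  induction t with
  | nil =>
    intro p start b curr vals hsp hps ht hcurr
    have hpl : p = s.length := by
      have h0 := congrArg List.length ht
      simp only [List.length_nil, List.length_drop] at h0
      omega
    have hcurr' : curr = s.drop start := by
      rw [hcurr, hpl]
      exact List.take_of_length_le (by simp [List.length_drop])
    rw [PySem.List.enumerate_nil, bSplitLoop, aSplitFold]
    rw [PySem.List.slice_from_natCast]
    dsimp only
    by_cases hlt : start < s.length
    · have hne : curr ≠ [] := by
        rw [hcurr']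
        intro h0
        rw [List.drop_eq_nil_iff] at h0
        omega
      rw [if_pos hne, if_pos (by exact_mod_cast hlt)]
      rw [hcurr']
    · have hnil : curr = [] := by
        rw [hcurr']
        rw [List.drop_eq_nil_iff]
        omega
      rw [if_neg (by simp [hnil]), if_neg (by exact_mod_cast hlt)]
  | cons c t' ih =>
    intro p start b curr vals hsp hps ht hcurr
    have hplt : p < s.length := by
      by_contra h0
      have h1 : s.drop p = [] := List.drop_eq_nil_iff.mpr (by omega)
      rw [h1] at ht
      simp at ht
    have ht' : t' = s.drop (p+1) := by
      have h0 := congrArg List.tail ht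
      simpa [List.tail_drop] using h0
    have hcget : s[p]? = some c := by
      have h0 : (s.drop p)[0]? = some c := by rw [← ht]; rfl
      rw [List.getElem?_drop] at h0
      simpa using h0
    have hcast : (p : Int) + 1 = ((p + 1 : Nat) : Int) := by push_cast; ring
    rw [PySem.List.enumerate_cons, aSplitFold, bSplitLoop]
    by_cases hcb : c = ',' ∧ b = 0
    · rw [if_pos hcb, if_pos hcb]
      have hslice : PySem.List.slice s (some (start : Int)) (some (p : Int)) = curr := by
        rw [PySem.List.slice_natCast]
        exact hcurr.symm
      rw [hslice, hcast]
      exact ih (p+1) (p+1) b [] (vals ++ [curr]) (le_refl _) hplt ht' (by simp)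
    · rw [if_neg hcb, if_neg hcb]
      have hcurr' : curr ++ [c] = (s.drop start).take (p + 1 - start) := by
        have h1 : p + 1 - start = (p - start) + 1 := by omega
        rw [h1, List.take_add_one, ← hcurr]
        congr 1
        rw [List.getElem?_drop]
        rw [show start + (p - start) = p from by omega, hcget]
        rfl
      rw [hcast]
      exact ih (p+1) start _ (curr ++ [c]) vals (by omega) hplt ht' hcurr' 

lemma split_eq (s : List Char) : aSplitFold s 0 [] [] = bSplit s := by
  have h := split_loop_rel (s := s) s 0 0 0 [] [] (le_refl _) (by omega) (by simp) (by simp)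
  simp only [Nat.cast_zero] at h
  rw [h, bSplit]

lemma atom_eq {expr : String} {values : List (String × String)}
    (hpre : Pre_make_substitutions expr values) (e : String) :
    (match (PySem.Dict.mk values).get? e with
     | none => e
     | some v => aChain values (values.length + 1) v) = pvR values e := by
  cases hv : (PySem.Dict.mk values).get? e with
  | none =>
    have hterm : ¬ pvNT values e := by
      rintro ⟨v, hv2, -⟩
      rw [hv] at hv2
      simp at hv2
    exact (chain_term hterm).symm
  | some v =>
    by_cases hve : v = e
    · subst hve; rfl
    · have hnt : pvNT values e := ⟨v, hv, hve⟩
      have hfe : pvF values e = v := by simp [pvF, hv]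
      rw [chain_step hpre hnt, hfe]
      rfl

lemma worker_eq {expr : String} {values : List (String × String)}
    (hpre : Pre_make_substitutions expr values) :
    ∀ (fuel : Nat) (cs : List Char),
      aWorker values fuel cs = bWorker (bBuild values) fuel cs := by
  intro fuel
  induction fuel with
  | zero => intro cs; rfl
  | succ fuel ih =>
    intro cs
    rw [aWorker, bWorker]
    by_cases hp : '(' ∈ cs
    · rw [if_neg (not_not_intro hp), if_neg (not_not_intro hp)]
      rw [clauseParse, if_neg (not_not_intro hp)]
      dsimp only
      rw [split_eq]
      rw [show (fun v => aWorker values fuel v) = (fun a => bWorker (bBuild values) fuel a)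
        from funext ih]
    · rw [if_pos hp, if_pos hp]
      have hres := resolved_eq hpre (String.ofList cs)
      have hatom := atom_eq hpre (String.ofList cs)
      rw [hres]
      cases hv : (PySem.Dict.mk values).get? (String.ofList cs) with
      | none =>
        simp only [hv] at hatom ⊢
        rw [← hatom]
        simp
      | some v =>
        simp only [hv] at hatom ⊢
        rw [hatom]

-- ===== VERDICT (by name: the statement is the Claim_ definition above) =====
theorem make_substitutions_spec : Claim_equal_make_substitutions := by
  intro expr values _ hpre
  unfold Spec_make_substitutions make_substitutions make_substitutions_alt
  rw [worker_eq hpre]
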